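-- pv_equiv track=rewrite | github.com/sihymbaev92/raqat-ai | db/hatim_progress_store.py | _normalize_surahs
-- ===== SOURCE A (Python) =====
-- def _normalize_surahs(raw: list[int]) -> list[int]:
--     s: set[int] = set()
--     for x in raw:
--         try:
--             n = int(x)
--         except (TypeError, ValueError):
--             continue
--         if 1 <= n <= 114:
--             s.add(n)
--     return sorted(s)
-- ===== SOURCE B (Python) =====
-- def _normalize_surahs(raw: list[int]) -> list[int]:
--     # Sweep the fixed output domain instead of looping over raw:
--     # the result is exactly the valid surah numbers that occur in raw,
--     # emitted in increasing order by construction (no set, no sort).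
--     return [n for n in range(1, 115) if n in raw]
-- ===== Notes on version B (the rewrite author's own statement) =====
-- stated objective: simpler
-- what changed: Inverts the traversal: instead of looping over raw collecting valid values into a set and comparison-sorting it, B sweeps the fixed output domain 1..114 once and keeps each n with a membership test 'n in raw', so dedup and ordering fall out by construction with no set and no sort.
import Mathlib
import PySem

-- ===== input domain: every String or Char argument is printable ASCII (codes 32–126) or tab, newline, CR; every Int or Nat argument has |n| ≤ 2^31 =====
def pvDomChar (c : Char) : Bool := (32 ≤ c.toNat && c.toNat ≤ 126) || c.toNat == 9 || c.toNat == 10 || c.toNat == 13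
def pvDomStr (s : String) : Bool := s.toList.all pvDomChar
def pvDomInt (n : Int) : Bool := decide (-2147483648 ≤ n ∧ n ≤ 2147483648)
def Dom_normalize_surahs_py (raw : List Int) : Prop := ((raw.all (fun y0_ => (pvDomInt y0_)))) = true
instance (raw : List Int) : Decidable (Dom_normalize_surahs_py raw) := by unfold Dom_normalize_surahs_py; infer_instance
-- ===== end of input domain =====

-- B inverts the traversal: it sweeps the fixed domain 1..114 once testing 'n in raw',
-- so dedup and ordering fall out by construction with no set and no sort (objective: simpler).
-- int(x) on an int argument is the identity and never raises, so A's port drops the try/except.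

-- ===== PORT A =====
def normalize_surahs_py (raw : List Int) : List Int :=
  let s : PySem.Set Int :=
    raw.foldl (fun s x => if 1 ≤ x ∧ x ≤ 114 then PySem.Set.add s x else s) PySem.Set.empty
  PySem.List.sorted s (fun x => x) false

-- ===== PORT B =====
def normalize_surahs_py_alt (raw : List Int) : List Int :=
  (PySem.List.pyRange 1 115 1).filter (fun n => decide (n ∈ raw))

-- ===== PRECONDITION & SPEC =====
def Spec_normalize_surahs_py (raw : List Int) (out : List Int) : Prop := out = normalize_surahs_py_alt raw
instance (raw : List Int) (out : List Int) : Decidable (Spec_normalize_surahs_py raw out) := by unfold Spec_normalize_surahs_py; infer_instance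

-- ===== CLAIM =====
def Claim_equal_normalize_surahs_py : Prop := ∀ (raw : List Int), Dom_normalize_surahs_py raw → Spec_normalize_surahs_py raw (normalize_surahs_py raw)

-- ===== LEMMAS AND PROOFS =====

-- A's loop is set(filter valid raw)
theorem foldA_eq_ofList_filter (raw : List Int) (s : PySem.Set Int) :
    raw.foldl (fun s x => if 1 ≤ x ∧ x ≤ 114 then PySem.Set.add s x else s) s
      = PySem.Set.update s (raw.filter (fun x => decide (1 ≤ x ∧ x ≤ 114))) := by
  induction raw generalizing s with
  | nil => rfl
  | cons x t ih =>
    simp only [List.foldl_cons, List.filter_cons]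
    by_cases h : 1 ≤ x ∧ x ≤ 114
    · simp [h, ih, PySem.Set.update]
    · simp [h, ih, PySem.Set.update]

theorem normalize_surahs_py_spec : Claim_equal_normalize_surahs_py := by
  intro raw _
  unfold Spec_normalize_surahs_py normalize_surahs_py_alt
  show PySem.List.sorted (raw.foldl (fun s x => if 1 ≤ x ∧ x ≤ 114 then PySem.Set.add s x else s) PySem.Set.empty) (fun x => x) false = _
  rw [foldA_eq_ofList_filter, PySem.Set.update_empty]
  apply PySem.List.sorted_eq_of_perm_of_pairwise_lt
  · have hnd1 : ((PySem.List.pyRange 1 115 1).filter (fun n => decide (n ∈ raw))).Nodup :=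
      (PySem.List.nodup_pyRange_one 1 115).filter _
    have hnd2 : (PySem.Set.ofList (raw.filter (fun x => decide (1 ≤ x ∧ x ≤ 114)))).Nodup :=
      PySem.Set.nodup_ofList _
    apply List.perm_of_nodup_nodup_toFinset_eq hnd1 hnd2
    ext x
    simp only [List.mem_toFinset, List.mem_filter, PySem.Set.mem_ofList,
      PySem.List.mem_pyRange_one, decide_eq_true_eq]
    constructor
    · rintro ⟨⟨h1, h2⟩, hr⟩; exact ⟨hr, h1, by omega⟩
    · rintro ⟨hr, h1, h2⟩; exact ⟨⟨h1, by omega⟩, hr⟩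
  · exact (PySem.List.pairwise_lt_pyRange_one 1 115).filter _
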